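-- pv_equiv track=rewrite | github.com/jessyy2006/acapella-arranger | src/postprocess/voice_leading.py | _coalesce_same_pitch
-- ===== SOURCE A (Python) =====
-- def _coalesce_same_pitch(events: list[tuple[int, int]]) -> list[tuple[int, int]]:
--     """Merge adjacent events with identical pitch into one (sum durations)."""
--     merged: list[tuple[int, int]] = []
--     for pitch, dur in events:
--         if merged and merged[-1][0] == pitch:
--             merged[-1] = (pitch, merged[-1][1] + dur)
--         else:
--             merged.append((pitch, dur))
--     return merged
-- ===== SOURCE B (Python) =====
-- def _coalesce_same_pitch(events: list[tuple[int, int]]) -> list[tuple[int, int]]: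
--     """Merge adjacent events with identical pitch into one (sum durations)."""
--     n = len(events)
--     # pass 1: the indices at which a new run of equal pitches starts
--     starts = [i for i in range(n) if i == 0 or events[i][0] != events[i - 1][0]]
--     ends = starts[1:] + [n]
--     # pass 2: one output event per run, summing the durations over its slice
--     return [(events[a][0], sum(d for _, d in events[a:b]))
--             for a, b in zip(starts, ends)]
-- ===== Notes on version B (the rewrite author's own statement) =====
-- stated objective: alternative
-- what changed: Replaces A's single-pass accumulator that patches the last output element by two staged passes: first compute the list of run-start indices, then emit one (pitch, sum of duration slice) per consecutive boundary pair.
import Mathlib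
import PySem

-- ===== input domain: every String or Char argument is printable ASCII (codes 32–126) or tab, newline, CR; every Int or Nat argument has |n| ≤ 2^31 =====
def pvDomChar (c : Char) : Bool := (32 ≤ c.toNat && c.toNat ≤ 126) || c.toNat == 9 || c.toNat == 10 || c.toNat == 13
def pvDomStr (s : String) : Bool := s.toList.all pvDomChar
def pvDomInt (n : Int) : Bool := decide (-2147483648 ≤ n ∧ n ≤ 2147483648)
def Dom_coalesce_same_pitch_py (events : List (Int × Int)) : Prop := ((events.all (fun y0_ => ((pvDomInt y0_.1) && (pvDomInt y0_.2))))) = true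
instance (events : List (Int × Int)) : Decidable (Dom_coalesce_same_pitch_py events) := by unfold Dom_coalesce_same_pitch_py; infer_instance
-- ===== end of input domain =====

-- B replaces A's single-pass accumulator that patches the last output element by two staged passes:
-- pass 1 computes the run-start indices, pass 2 sums the duration slice between consecutive boundaries (alternative decomposition; same cost).

-- ===== PORT A =====
-- one loop iteration: if merged and merged[-1][0] == pitch then patch last else append
def pvStepA (merged : List (Int × Int)) (ev : Int × Int) : List (Int × Int) :=
  match merged.getLast? with
  | some last => if last.1 == ev.1 then merged.dropLast ++ [(ev.1, last.2 + ev.2)] else merged ++ [ev]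
  | none => merged ++ [ev]

def coalesce_same_pitch_py (events : List (Int × Int)) : List (Int × Int) :=
  events.foldl pvStepA []

-- ===== PORT B =====
-- events[i] for i drawn from range(n) (and i-1 with i ≥ 1 guarded by the short-circuit 'or') is always
-- in range, so Python never raises; pyGetD with a dummy default is exact on those in-range accesses.
def coalesce_same_pitch_py_alt (events : List (Int × Int)) : List (Int × Int) :=
  let n : Int := events.length
  let starts : List Int := (PySem.List.pyRange 0 n 1).filter
    (fun i => i == 0 || !((PySem.List.pyGetD events i (0, 0)).1 == (PySem.List.pyGetD events (i - 1) (0, 0)).1))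
  let ends : List Int := PySem.List.slice starts (some 1) none ++ [n]
  (starts.zip ends).map (fun ab =>
    ((PySem.List.pyGetD events ab.1 (0, 0)).1,
     ((PySem.List.slice events (some ab.1) (some ab.2)).map Prod.snd).sum))

-- ===== PRECONDITION & SPEC =====
def Spec_coalesce_same_pitch_py (events : List (Int × Int)) (out : List (Int × Int)) : Prop := out = coalesce_same_pitch_py_alt events
instance (events : List (Int × Int)) (out : List (Int × Int)) : Decidable (Spec_coalesce_same_pitch_py events out) := by unfold Spec_coalesce_same_pitch_py; infer_instance

-- ===== CLAIM (what is proved, stated in full; the proofs are below) =====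
def Claim_equal_coalesce_same_pitch_py : Prop := ∀ (events : List (Int × Int)), Dom_coalesce_same_pitch_py events → Spec_coalesce_same_pitch_py events (coalesce_same_pitch_py events)

-- ===== LEMMAS AND PROOFS =====

-- proof-side normal form: consecutive runs, one output per run
def pvGroups : List (Int × Int) → List (Int × Int)
  | [] => []
  | (p, d) :: rest =>
      let grp := rest.takeWhile (fun x => x.1 == p)
      let rest' := rest.dropWhile (fun x => x.1 == p)
      (p, d + (grp.map Prod.snd).sum) :: pvGroups rest'
termination_by l => l.length
decreasing_by
  simpa using Nat.lt_succ_of_le (List.length_dropWhile_le _ _)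

-- ---- A-side: foldl pvStepA [] = pvGroups ----

theorem pvStepA_ne_nil (acc : List (Int × Int)) (ev : Int × Int) : pvStepA acc ev ≠ [] := by
  unfold pvStepA
  cases h : acc.getLast? with
  | none => simp
  | some last => split <;> (try split) <;> simp

theorem pvStepA_append (xs acc : List (Int × Int)) (ev : Int × Int) (h : acc ≠ []) :
    pvStepA (xs ++ acc) ev = xs ++ pvStepA acc ev := by
  unfold pvStepA
  simp only [List.getLast?_append_of_ne_nil _ h]
  cases hl : acc.getLast? with
  | none => simp at hl; exact absurd hl h
  | some last =>
      split <;> (try split) <;> simp [List.dropLast_append_of_ne_nil h]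

theorem foldl_pvStepA_append (evs : List (Int × Int)) (xs acc : List (Int × Int)) (h : acc ≠ []) :
    evs.foldl pvStepA (xs ++ acc) = xs ++ evs.foldl pvStepA acc := by
  induction evs generalizing acc with
  | nil => simp
  | cons e es ih =>
      simp only [List.foldl_cons]
      rw [pvStepA_append xs acc e h, ih _ (pvStepA_ne_nil acc e)]

theorem foldl_pvStepA_single (rest : List (Int × Int)) (p d : Int) :
    rest.foldl pvStepA [(p, d)] =
      (p, d + ((rest.takeWhile (fun x => x.1 == p)).map Prod.snd).sum) ::
        pvGroups (rest.dropWhile (fun x => x.1 == p)) := by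
  induction rest generalizing p d with
  | nil => simp [pvGroups]
  | cons qe rs ih =>
      obtain ⟨q, e⟩ := qe
      by_cases hq : q = p
      · subst hq
        have hstep : pvStepA [(q, d)] (q, e) = [(q, d + e)] := by
          simp [pvStepA]
        simp only [List.foldl_cons, hstep]
        rw [ih]
        simp [add_assoc]
      · have hq' : ((q : Int) == p) = false := by simp [hq]
        have hstep : pvStepA [(p, d)] (q, e) = [(p, d)] ++ [(q, e)] := by
          simp [pvStepA, Ne.symm hq]
        simp only [List.foldl_cons, hstep]
        rw [foldl_pvStepA_append rs [(p, d)] [(q, e)] (by simp), ih]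
        simp [List.takeWhile, List.dropWhile, hq', pvGroups]

theorem foldA_eq_groups (events : List (Int × Int)) :
    events.foldl pvStepA [] = pvGroups events := by
  cases events with
  | nil => simp [pvGroups]
  | cons pd rest =>
      obtain ⟨p, d⟩ := pd
      have h0 : pvStepA [] (p, d) = [(p, d)] := by simp [pvStepA]
      simp only [List.foldl_cons, h0]
      rw [foldl_pvStepA_single]
      simp [pvGroups]

-- ---- B-side: Nat-world reformulation of the port and its run decomposition ----

-- the run-start predicate on Nat indices
def pvP (events : List (Int × Int)) (k : Nat) : Bool :=
  k == 0 || !((events.getD k (0, 0)).1 == (events.getD (k - 1) (0, 0)).1)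

def pvNatStarts (events : List (Int × Int)) : List Nat :=
  (List.range events.length).filter (pvP events)

def pvBNat (events : List (Int × Int)) : List (Int × Int) :=
  ((pvNatStarts events).zip ((pvNatStarts events).tail ++ [events.length])).map
    (fun ab => ((events.getD ab.1 (0, 0)).1,
      (((events.drop ab.1).take (ab.2 - ab.1)).map Prod.snd).sum))

theorem alt_eq_bNat (events : List (Int × Int)) :
    coalesce_same_pitch_py_alt events = pvBNat events := by
  unfold coalesce_same_pitch_py_alt pvBNat pvNatStarts
  simp only []
  have hrange : PySem.List.pyRange 0 (events.length : Int) 1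
      = (List.range events.length).map (fun k : Nat => (k : Int)) := by
    rw [PySem.List.pyRange_one]
    simp
  rw [hrange, List.filter_map]
  have hpred : ∀ k : Nat,
      ((fun i : Int => i == 0 || !((PySem.List.pyGetD events i (0, 0)).1 == (PySem.List.pyGetD events (i - 1) (0, 0)).1)) ∘ (fun k : Nat => (k : Int))) k
        = pvP events k := by
    intro k
    cases k with
    | zero => simp [pvP]
    | succ k' =>
        simp only [Function.comp, pvP]
        rw [show ((k' + 1 : Nat) : Int) - 1 = ((k' : Nat) : Int) by push_cast; ring]
        rw [PySem.List.pyGetD_natCast, PySem.List.pyGetD_natCast]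
        simp
        intro h
        exact absurd h (by omega)
  rw [List.filter_congr (fun k _ => hpred k)]
  rw [PySem.List.slice_from_one]
  rw [← List.map_tail]
  have : ((List.range events.length).filter (pvP events)).tail.map (fun k : Nat => (k : Int)) ++ [(events.length : Int)]
      = (((List.range events.length).filter (pvP events)).tail ++ [events.length]).map (fun k : Nat => (k : Int)) := by
    simp
  rw [this, List.zip_map, List.map_map]
  apply List.map_congr_left
  intro ab _
  obtain ⟨a, b⟩ := ab
  simp only [Function.comp, Prod.map]
  rw [PySem.List.slice_natCast]
  simp [PySem.List.pyGetD_natCast]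

-- pitch of any index below t.length+1 in (p,d)::(t++r) is p
theorem pvPitch_prefix (p d : Int) (t r : List (Int × Int)) (ht : ∀ x ∈ t, x.1 = p)
    (j : Nat) (hj : j ≤ t.length) : ((((p, d) :: (t ++ r)).getD j (0, 0)).1) = p := by
  cases j with
  | zero => simp
  | succ j' =>
      rw [List.getD_cons_succ]
      have hj' : j' < t.length := by omega
      rw [List.getD_append _ _ _ _ hj', List.getD_eq_getElem _ _ hj']
      exact ht _ (t.getElem_mem hj')

theorem pvFilter_prefix (p d : Int) (t r : List (Int × Int)) (ht : ∀ x ∈ t, x.1 = p) :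
    (List.range (t.length + 1)).filter (pvP ((p, d) :: (t ++ r))) = [0] := by
  rw [List.range_succ_eq_map, List.filter_cons_of_pos (by simp [pvP]), List.filter_map]
  have : (List.range t.length).filter (pvP ((p, d) :: (t ++ r)) ∘ Nat.succ) = [] := by
    apply List.filter_eq_nil_iff.mpr
    intro j hj
    rw [List.mem_range] at hj
    simp only [Function.comp, pvP]
    rw [pvPitch_prefix p d t r ht (j + 1) (by omega),
        pvPitch_prefix p d t r ht (j + 1 - 1) (by omega)]
    simp
  rw [this]
  simp

theorem pvP_shift (p d : Int) (t r : List (Int × Int)) (ht : ∀ x ∈ t, x.1 = p)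
    (hr : ∀ x, r.head? = some x → (x.1 == p) = false)
    (j : Nat) (hj : j < r.length) :
    pvP ((p, d) :: (t ++ r)) (t.length + 1 + j) = pvP r j := by
  have hE : (p, d) :: (t ++ r) = ((p, d) :: t) ++ r := by simp
  have hlen : ((p, d) :: t).length = t.length + 1 := by simp
  cases j with
  | zero =>
      have hne : r ≠ [] := by intro h; subst h; simp at hj
      obtain ⟨x, r', rfl⟩ := List.exists_cons_of_ne_nil hne
      have hx := hr x rfl
      simp only [pvP]
      rw [hE, List.getD_append_right _ _ _ _ (by omega)]
      have h1 : t.length + 1 + 0 - ((p, d) :: t).length = 0 := by simp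
      rw [h1]
      have h2 : ((((p, d) :: t) ++ x :: r').getD (t.length + 1 + 0 - 1) (0, 0)).1 = p := by
        have : t.length + 1 + 0 - 1 = t.length := by omega
        rw [this, ← hE]
        exact pvPitch_prefix p d t (x :: r') ht t.length (by omega)
      rw [h2]
      simp only [List.getD_cons_zero]
      simp [hx]
  | succ j' =>
      simp only [pvP]
      rw [hE, List.getD_append_right _ _ _ _ (by omega),
          List.getD_append_right _ _ _ _ (by omega)]
      have h1 : t.length + 1 + (j' + 1) - ((p, d) :: t).length = j' + 1 := by simp
      have h2 : t.length + 1 + (j' + 1) - 1 - ((p, d) :: t).length = j' := by simp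
      rw [h1, h2]
      simp

theorem pvNatStarts_decomp (p d : Int) (t r : List (Int × Int)) (ht : ∀ x ∈ t, x.1 = p)
    (hr : ∀ x, r.head? = some x → (x.1 == p) = false) :
    pvNatStarts ((p, d) :: (t ++ r)) = 0 :: (pvNatStarts r).map (t.length + 1 + ·) := by
  unfold pvNatStarts
  have hlen : ((p, d) :: (t ++ r)).length = (t.length + 1) + r.length := by simp; omega
  rw [hlen, List.range_add, List.filter_append, pvFilter_prefix p d t r ht, List.filter_map]
  have : (List.range r.length).filter (pvP ((p, d) :: (t ++ r)) ∘ (t.length + 1 + ·)) =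
      (List.range r.length).filter (pvP r) := by
    apply List.filter_congr
    intro j hj
    rw [List.mem_range] at hj
    exact pvP_shift p d t r ht hr j hj
  rw [this]
  simp

theorem pvNatStarts_cons (x : Int × Int) (r' : List (Int × Int)) :
    ∃ s, pvNatStarts (x :: r') = 0 :: s := by
  unfold pvNatStarts
  rw [List.length_cons, List.range_succ_eq_map, List.filter_cons_of_pos (by simp [pvP])]
  exact ⟨_, rfl⟩

theorem pvHead_dropWhile {α : Type} (p : α → Bool) (l : List α) (x : α)
    (hh : (l.dropWhile p).head? = some x) : p x = false := by
  induction l with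
  | nil => simp [List.dropWhile] at hh
  | cons a l ih =>
      by_cases h : p a
      · rw [List.dropWhile_cons_of_pos h] at hh; exact ih hh
      · rw [List.dropWhile_cons_of_neg h] at hh; simp at hh; subst hh; simpa using h

theorem bNat_eq_groups (events : List (Int × Int)) :
    pvBNat events = pvGroups events := by
  induction events using pvGroups.induct with
  | case1 => simp [pvBNat, pvNatStarts, pvGroups]
  | case2 p d rest r ih =>
      have ht : ∀ x ∈ rest.takeWhile (fun x => x.1 == p), x.1 = p := by
        intro x hx
        have := List.mem_takeWhile_imp hx
        simpa using this
      have hr : ∀ x, (rest.dropWhile (fun x => x.1 == p)).head? = some x → (x.1 == p) = false := by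
        intro x hx
        exact pvHead_dropWhile _ rest x hx
      simp only at ih ⊢
      set t := rest.takeWhile (fun x => x.1 == p) with hdt
      set r' := rest.dropWhile (fun x => x.1 == p) with hdr
      have hrest : rest = t ++ r' := (List.takeWhile_append_dropWhile).symm
      have hgroups : pvGroups ((p, d) :: rest)
          = (p, d + (t.map Prod.snd).sum) :: pvGroups r' := by
        rw [pvGroups]
      rw [hgroups]
      unfold pvBNat
      rw [hrest, pvNatStarts_decomp p d t r' ht hr]
      have hlen : ((p, d) :: (t ++ r')).length = (t.length + 1) + r'.length := by
        simp; omega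
      rw [hlen]
      by_cases hcase : r' = []
      · rw [hcase]
        simp [pvNatStarts, pvGroups, List.take_succ_cons]
        rw [List.take_of_length_le (by simp)]
      · obtain ⟨x, r'', hx⟩ := List.exists_cons_of_ne_nil hcase
        obtain ⟨sS, hs⟩ : ∃ sN, pvNatStarts r' = 0 :: sN := by
          rw [hx]; exact pvNatStarts_cons x r''
        rw [hs]
        simp only [List.map_cons, Nat.add_zero, List.tail_cons, List.cons_append,
          List.zip_cons_cons, List.map_cons]
        congr 1
        · -- the first run: indices 0 .. t.length
          simp only [Nat.sub_zero, List.drop_zero, List.take_succ_cons, List.getD_cons_zero]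
          rw [List.take_left]
          simp
        · -- remaining runs: shift all indices by t.length + 1 and land in r'
          have h1 : (t.length + 1) :: List.map (fun x => t.length + 1 + x) sS
              = List.map (fun x => t.length + 1 + x) (0 :: sS) := by simp
          have h2 : List.map (fun x => t.length + 1 + x) sS ++ [t.length + 1 + r'.length]
              = List.map (fun x => t.length + 1 + x) (sS ++ [r'.length]) := by simp
          rw [h1, h2, List.zip_map, List.map_map]
          have h3 : ∀ ab : Nat × Nat,
              ((fun ab : Nat × Nat =>
                  ((((p, d) :: (t ++ r')).getD ab.1 (0, 0)).1,
                    (List.map Prod.snd (List.take (ab.2 - ab.1) (List.drop ab.1 ((p, d) :: (t ++ r'))))).sum)) ∘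
                Prod.map (fun x => t.length + 1 + x) (fun x => t.length + 1 + x)) ab
              = (fun ab : Nat × Nat =>
                  ((r'.getD ab.1 (0, 0)).1,
                    (List.map Prod.snd (List.take (ab.2 - ab.1) (List.drop ab.1 r'))).sum)) ab := by
            rintro ⟨a, b⟩
            simp only [Function.comp, Prod.map]
            have hl : (p, d) :: (t ++ r') = ((p, d) :: t) ++ r' := by simp
            have hidx : ∀ i : Nat, t.length + 1 + i = ((p, d) :: t).length + i := by simp
            rw [hl, hidx a, hidx b, List.getD_append_right _ _ _ _ (by omega),
              List.drop_length_add_append, Nat.add_sub_cancel_left,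
              Nat.add_sub_add_left]
          rw [List.map_congr_left (fun ab _ => h3 ab), ← ih]
          unfold pvBNat
          rw [hs]
          simp
          rfl

-- ===== VERDICT (by name: the statement is the Claim_ definition above) =====
theorem coalesce_same_pitch_py_spec : Claim_equal_coalesce_same_pitch_py := by
  intro events _
  unfold Spec_coalesce_same_pitch_py coalesce_same_pitch_py
  rw [foldA_eq_groups, alt_eq_bNat, bNat_eq_groups]
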